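-- pv_equiv track=rewrite | github.com/slpc6/Prueba_tecnica_quipux | HackRank/even_tree.py | dfs
-- ===== SOURCE A (Python) =====
-- def dfs(graph: dict, node: int, parent: int) -> int:
--     """def: deep-first search
--
--     args:
--         graph: diccionario de nodos y aristas
--         node: nodo actual
--         parent: nodo padre
--
--     return:
--         int: cantidad de nodos pares
-- """
--     children = 0
--     for child in graph[node]:
--         if child != parent:
--             children += dfs(graph, child, node)
--     if children % 2 == 0:
--         return 1
--     return children + 1
-- ===== SOURCE B (Python) =====
-- def dfs(graph: dict, node: int, parent: int) -> int:
--     """Iterative post-order DFS with an explicit stack of (node, parent,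
--     expanded) frames and a stack of completed subtree values, instead of
--     recursion."""
--     stack = [(node, parent, False)]
--     results = []
--     while stack:
--         n, p, expanded = stack.pop()
--         if expanded:
--             k = len([c for c in graph[n] if c != p])
--             s = sum(results[len(results) - k:])
--             del results[len(results) - k:]
--             results.append(1 if s % 2 == 0 else s + 1)
--         else:
--             stack.append((n, p, True))
--             for c in graph[n]:
--                 if c != p:
--                     stack.append((c, n, False))
--     return results[-1]
-- ===== Notes on version B (the rewrite author's own statement) =====
-- stated objective: alternative
-- what changed: Replaces the recursive DFS by an iterative post-order traversal driven by an explicit stack of (node, parent, expanded) frames and a stack of completed subtree values, so no recursion (and no Python call stack growth) is used; Pre_ excludes exactly the inputs where A raises (a missing key reached by the traversal, or a reachable cycle in the recursion-state graph, where A hits KeyError/RecursionError).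
import Mathlib
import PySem

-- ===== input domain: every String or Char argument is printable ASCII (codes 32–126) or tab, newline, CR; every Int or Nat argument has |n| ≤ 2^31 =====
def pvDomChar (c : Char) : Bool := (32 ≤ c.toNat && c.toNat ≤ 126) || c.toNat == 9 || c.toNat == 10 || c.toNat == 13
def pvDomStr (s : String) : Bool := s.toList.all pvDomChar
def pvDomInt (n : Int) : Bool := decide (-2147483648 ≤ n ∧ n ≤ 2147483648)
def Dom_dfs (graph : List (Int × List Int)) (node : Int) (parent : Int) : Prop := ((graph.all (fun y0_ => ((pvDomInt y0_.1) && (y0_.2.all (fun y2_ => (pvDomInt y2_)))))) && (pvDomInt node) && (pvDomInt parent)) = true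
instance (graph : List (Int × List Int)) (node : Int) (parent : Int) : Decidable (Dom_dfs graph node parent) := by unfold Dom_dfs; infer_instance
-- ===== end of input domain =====

-- B replaces A's recursion by an explicit-stack iterative post-order DFS; equivalence is proved on Pre_,
-- which admits exactly the inputs where A's recursion terminates with every looked-up node present.

-- ===== PORT A =====
-- graph[node]: Python dict lookup, first binding wins (the codec keeps the first)
def pvLookup (g : List (Int × List Int)) (n : Int) : Option (List Int) :=
  match g with
  | [] => none
  | (k, cs) :: rest => if k = n then some cs else pvLookup rest n

-- fuel bound used by both ports and by Pre_; large enough for every input Pre_ admits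
def pvFuel (g : List (Int × List Int)) : Nat :=
  (g.length + (g.map (fun kv => kv.2.length)).sum + 2) ^ 2

mutual
-- literal port of A's recursion, with fuel (none = fuel exhausted or KeyError)
def dfsF : Nat → List (Int × List Int) → Int → Int → Option Int
  | 0, _, _, _ => none
  | f + 1, g, n, p =>
    match pvLookup g n with
    | none => none
    | some cs => dfsGo f g n p cs 0
termination_by f _ _ _ => (f, 0)
-- the 'for child in graph[node]' loop with accumulator children, then the final if
def dfsGo : Nat → List (Int × List Int) → Int → Int → List Int → Int → Option Int
  | _, _, _, _, [], acc => some (if PySem.Int.mod acc 2 = 0 then 1 else acc + 1)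
  | f, g, n, p, c :: rest, acc =>
    if c = p then dfsGo f g n p rest acc
    else
      match dfsF f g c n with
      | none => none
      | some v => dfsGo f g n p rest (acc + v)
termination_by f _ _ _ cs _ => (f, cs.length + 1)
end

def dfs (graph : List (Int × List Int)) (node : Int) (parent : Int) : Int :=
  (dfsF (pvFuel graph + 1) graph node parent).getD 0

-- ===== PORT B =====
def pvMaxLen (g : List (Int × List Int)) : Nat :=
  (g.map (fun kv => kv.2.length)).foldr max 0

-- literal port of B's while loop: stack of (node, parent, expanded) frames (head = top) and the results stack
def runM : Nat → List (Int × List Int) → List (Int × Int × Bool) → List Int → Option Int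
  | 0, _, _, _ => none
  | _ + 1, _, [], res => PySem.List.pyGet? res (-1)
  | f + 1, g, (n, p, e) :: st, res =>
    if e then
      match pvLookup g n with
      | none => none
      | some cs =>
        let k := (cs.filter (fun c => c ≠ p)).length
        -- results[len(results)-k:] — exact here: the machine keeps k ≤ len(results) at every expanded frame
        let s := (res.drop (res.length - k)).sum
        runM f g st ((res.take (res.length - k)) ++ [if PySem.Int.mod s 2 = 0 then (1 : Int) else s + 1])
    else
      match pvLookup g n with
      | none => none
      | some cs =>
        runM f g (((cs.filter (fun c => c ≠ p)).map (fun c => (c, n, false))).reverse ++ (n, p, true) :: st) res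

def dfs_alt (graph : List (Int × List Int)) (node : Int) (parent : Int) : Int :=
  (runM ((pvMaxLen graph + 2) ^ (pvFuel graph + 1) + 1) graph [(node, parent, false)] []).getD 0

-- ===== PRECONDITION & SPEC =====
-- recursion-state successors: from state (n,p) A recurses into (c,n) for each child c ≠ p
def pvSuccs (g : List (Int × List Int)) (s : Int × Int) : List (Int × Int) :=
  match pvLookup g s.1 with
  | none => []
  | some cs => (cs.filter (fun c => c ≠ s.2)).map (fun c => (c, s.1))

-- reachable-state closure (fuel-bounded saturation; duplicates never added)
def pvCloseIter : Nat → List (Int × List Int) → List (Int × Int) → List (Int × Int)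
  | 0, _, R => R
  | f + 1, g, R =>
    let R' := (R.flatMap (pvSuccs g)).foldl (fun acc t => if t ∈ acc then acc else acc ++ [t]) R
    if R' = R then R else pvCloseIter f g R'

def pvClose (g : List (Int × List Int)) (n p : Int) : List (Int × Int) :=
  pvCloseIter (pvFuel g) g [(n, p)]

-- peel states having no successor left; on an acyclic state graph this empties the set
def pvPeelStep (g : List (Int × List Int)) (R : List (Int × Int)) : List (Int × Int) :=
  R.filter (fun s => (pvSuccs g s).any (fun t => t ∈ R))

def pvPeelN : Nat → List (Int × List Int) → List (Int × Int) → List (Int × Int)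
  | 0, _, R => R
  | k + 1, g, R => pvPeelStep g (pvPeelN k g R)

def pvPreB (g : List (Int × List Int)) (node parent : Int) : Bool :=
  decide ((node, parent) ∈ pvClose g node parent) &&
  (pvClose g node parent).all (fun s => (pvLookup g s.1).isSome) &&
  (pvClose g node parent).all (fun s => (pvSuccs g s).all (fun t => t ∈ pvClose g node parent)) &&
  decide (pvPeelN (pvFuel g) g (pvClose g node parent) = [])

-- Pre_ is a shape condition on the input graph alone (it never computes either program's output):
-- the set of recursion states (node, parent) reachable along graph edges is closed, every reached
-- node is a key of graph, and the reachable state graph is acyclic (certified by leaf-peeling).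
-- These are exactly the inputs on which Python A returns normally; outside them A raises
-- KeyError (a child that is not a key) or RecursionError (a reachable cycle).
def Pre_dfs (graph : List (Int × List Int)) (node : Int) (parent : Int) : Prop :=
  pvPreB graph node parent = true
instance (graph : List (Int × List Int)) (node : Int) (parent : Int) : Decidable (Pre_dfs graph node parent) := by unfold Pre_dfs; infer_instance

def pvWitness_dfs : (List (Int × List Int)) × Int × Int := ([(1, [2, 3]), (2, [1]), (3, [1])], 1, 0)

def Spec_dfs (graph : List (Int × List Int)) (node : Int) (parent : Int) (out : Int) : Prop := out = dfs_alt graph node parent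
instance (graph : List (Int × List Int)) (node : Int) (parent : Int) (out : Int) : Decidable (Spec_dfs graph node parent out) := by unfold Spec_dfs; infer_instance

-- ===== CLAIM (what is proved, stated in full; the proofs are below) =====
def Claim_equal_dfs : Prop := ∀ (graph : List (Int × List Int)) (node : Int) (parent : Int), Dom_dfs graph node parent → Pre_dfs graph node parent → Spec_dfs graph node parent (dfs graph node parent)

-- ===== LEMMAS AND PROOFS =====

theorem pv_witness_ok : Dom_dfs pvWitness_dfs.1 pvWitness_dfs.2.1 pvWitness_dfs.2.2 ∧ Pre_dfs pvWitness_dfs.1 pvWitness_dfs.2.1 pvWitness_dfs.2.2 := by decide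

-- any list bound to a key of g has length at most pvMaxLen g
theorem lookup_maxLen (g : List (Int × List Int)) (n : Int) (cs : List Int)
    (h : pvLookup g n = some cs) : cs.length ≤ pvMaxLen g := by
  induction g with
  | nil => simp [pvLookup] at h
  | cons kv rest ih =>
    rw [pvLookup] at h
    rw [pvMaxLen, List.map_cons, List.foldr_cons]
    split at h
    · cases h; exact Nat.le_max_left _ _
    · exact le_trans (ih h) (Nat.le_max_right _ _)

-- characterisation of A's inner loop: all non-parent children succeed and the result is the even/odd rule
theorem go_spec (f : Nat) (g : List (Int × List Int)) (n p : Int) :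
    ∀ (cs : List Int) (acc w : Int), dfsGo f g n p cs acc = some w →
    ∃ vs : List Int, List.Forall₂ (fun c v => dfsF f g c n = some v) (cs.filter (fun c => c ≠ p)) vs ∧
      w = (if PySem.Int.mod (acc + vs.sum) 2 = 0 then 1 else acc + vs.sum + 1) := by
  intro cs
  induction cs with
  | nil =>
    intro acc w h
    rw [dfsGo] at h
    refine ⟨[], List.Forall₂.nil, ?_⟩
    simpa using h.symm
  | cons c rest ih =>
    intro acc w h
    rw [dfsGo] at h
    by_cases hc : c = p
    · rw [if_pos hc] at h
      obtain ⟨vs, hall, hw⟩ := ih acc w h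
      refine ⟨vs, ?_, hw⟩
      simpa [List.filter_cons, hc] using hall
    · rw [if_neg hc] at h
      rcases hv : dfsF f g c n with _ | v₀
      · rw [hv] at h; exact absurd h (by simp)
      · rw [hv] at h
        obtain ⟨vs, hall, hw⟩ := ih (acc + v₀) w h
        refine ⟨v₀ :: vs, ?_, ?_⟩
        · have hf : List.filter (fun c => decide (c ≠ p)) (c :: rest)
              = c :: List.filter (fun c => decide (c ≠ p)) rest := by simp [hc]
          rw [hf]
          exact List.Forall₂.cons hv hall
        · rw [hw]; simp only [List.sum_cons, ← add_assoc]

-- A's inner loop succeeds when every non-parent child call succeeds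
theorem go_isSome (f : Nat) (g : List (Int × List Int)) (n p : Int) :
    ∀ (cs : List Int) (acc : Int), (∀ c ∈ cs, c ≠ p → (dfsF f g c n).isSome) →
    (dfsGo f g n p cs acc).isSome := by
  intro cs
  induction cs with
  | nil => intro acc _; rw [dfsGo]; simp
  | cons c rest ih =>
    intro acc hall
    rw [dfsGo]
    by_cases hc : c = p
    · rw [if_pos hc]
      exact ih acc (fun c' h1 h2 => hall c' (List.mem_cons_of_mem _ h1) h2)
    · rw [if_neg hc]
      have := hall c (List.mem_cons_self ..) hc
      rcases hv : dfsF f g c n with _ | v₀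
      · rw [hv] at this; simp at this
      · exact ih (acc + v₀) (fun c' h1 h2 => hall c' (List.mem_cons_of_mem _ h1) h2)

-- termination of A's recursion from the peeling certificate
theorem dfsF_isSome (g : List (Int × List Int)) (R : List (Int × Int))
    (hkeys : ∀ s ∈ R, (pvLookup g s.1).isSome)
    (hstab : ∀ s ∈ R, ∀ t ∈ pvSuccs g s, t ∈ R) :
    ∀ (k : Nat) (s : Int × Int), s ∈ R → s ∉ pvPeelN k g R →
    ∀ f, k < f → (dfsF f g s.1 s.2).isSome := by
  intro k
  induction k with
  | zero => intro s hs hns; exact absurd hs (by simpa [pvPeelN] using hns)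
  | succ k ih =>
    intro s hs hns f hf
    by_cases hmem : s ∈ pvPeelN k g R
    · -- s was peeled at step k+1: every successor already left
      rw [pvPeelN, pvPeelStep] at hns
      have hnotkept : ¬ ((pvSuccs g s).any (fun t => decide (t ∈ pvPeelN k g R)) = true) := by
        intro hany
        exact hns (List.mem_filter.mpr ⟨hmem, hany⟩)
      rw [List.any_eq_true] at hnotkept
      push Not at hnotkept
      obtain ⟨n, p⟩ := s
      match f, hf with
      | f' + 1, hf =>
        rw [dfsF]
        rcases hl : pvLookup g n with _ | cs
        · have := hkeys (n, p) hs; rw [hl] at this; simp at this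
        · apply go_isSome
          intro c hc hcp
          have ht : (c, n) ∈ pvSuccs g (n, p) := by
            rw [pvSuccs]
            simp only [hl]
            exact List.mem_map.mpr ⟨c, List.mem_filter.mpr ⟨hc, by simpa using hcp⟩, rfl⟩
          have htR : (c, n) ∈ R := hstab (n, p) hs (c, n) ht
          have htn : (c, n) ∉ pvPeelN k g R := by
            intro hmem'
            exact absurd (by simpa using hmem') (by simpa using hnotkept (c, n) ht)
          exact ih (c, n) htR htn f' (by omega)
    · exact ih s hs hmem f (by omega)

theorem runM_mono (g : List (Int × List Int)) :
    ∀ (f : Nat) (st : List (Int × Int × Bool)) (res : List Int) (v : Int),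
    runM f g st res = some v → runM (f + 1) g st res = some v := by
  intro f
  induction f with
  | zero => intro st res v h; rw [runM] at h; exact absurd h (by simp)
  | succ f ih =>
    intro st res v h
    match st with
    | [] => rw [runM] at h ⊢; exact h
    | (n, p, e) :: st' =>
      rw [runM] at h ⊢
      cases e <;> rcases hl : pvLookup g n with _ | cs <;>
        simp only [Bool.false_eq_true, if_false, if_true, hl] at h ⊢ <;>
        first
          | exact ih _ _ _ h
          | exact absurd h (by simp)

theorem runM_mono_le (g : List (Int × List Int)) (f f' : Nat) (st : List (Int × Int × Bool))
    (res : List Int) (v : Int) (h : runM f g st res = some v) (hle : f ≤ f') :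
    runM f' g st res = some v := by
  induction hle with
  | refl => exact h
  | step _ ih => exact runM_mono g _ _ _ _ ih

-- processing a block of unexpanded child frames appends their values (in processing order)
theorem runM_push (f : Nat) (g : List (Int × List Int)) (n : Int)
    (HIH : ∀ c v', dfsF f g c n = some v' → ∃ k ≤ (pvMaxLen g + 2) ^ f,
      ∀ st res m, runM (k + m) g ((c, n, false) :: st) res = runM m g st (res ++ [v'])) :
    ∀ (cl vs : List Int), List.Forall₂ (fun c v => dfsF f g c n = some v) cl vs →
    ∃ k ≤ cl.length * (pvMaxLen g + 2) ^ f,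
      ∀ st res m, runM (k + m) g ((cl.map (fun c => (c, n, false))).reverse ++ st) res
        = runM m g st (res ++ vs.reverse) := by
  intro cl vs hfa
  induction hfa with
  | nil => exact ⟨0, Nat.zero_le _, fun st res m => by simp⟩
  | @cons c v cl' vs' hcv htail ih =>
    obtain ⟨k1, hk1, H1⟩ := ih
    obtain ⟨k2, hk2, H2⟩ := HIH c v hcv
    refine ⟨k1 + k2, ?_, fun st res m => ?_⟩
    · simp only [List.length_cons]
      rw [Nat.add_mul, Nat.one_mul]
      omega
    · have hsh : ((c :: cl').map (fun c => (c, n, false))).reverse ++ st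
          = (cl'.map (fun c => (c, n, false))).reverse ++ ((c, n, false) :: st) := by
        simp
      rw [hsh]
      have e1 := H1 ((c, n, false) :: st) res (k2 + m)
      have e2 := H2 st (res ++ vs'.reverse) m
      calc runM (k1 + k2 + m) g ((cl'.map (fun c => (c, n, false))).reverse ++ ((c, n, false) :: st)) res
          = runM (k1 + (k2 + m)) g ((cl'.map (fun c => (c, n, false))).reverse ++ ((c, n, false) :: st)) res := by
            rw [Nat.add_assoc]
        _ = runM (k2 + m) g ((c, n, false) :: st) (res ++ vs'.reverse) := e1
        _ = runM m g st (res ++ vs'.reverse ++ [v]) := e2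
        _ = runM m g st (res ++ ((v :: vs').reverse)) := by simp

-- simulation: one successful recursive call = a block of machine steps
theorem runM_sim (g : List (Int × List Int)) :
    ∀ (f : Nat) (n p v : Int), dfsF f g n p = some v →
    ∃ k ≤ (pvMaxLen g + 2) ^ f,
      ∀ st res m, runM (k + m) g ((n, p, false) :: st) res = runM m g st (res ++ [v]) := by
  intro f
  induction f with
  | zero => intro n p v h; rw [dfsF] at h; exact absurd h (by simp)
  | succ f ihf =>
    intro n p v h
    rw [dfsF] at h
    rcases hl : pvLookup g n with _ | cs
    · rw [hl] at h; exact absurd h (by simp)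
    · rw [hl] at h
      obtain ⟨vs, hfa, hv⟩ := go_spec f g n p cs 0 v h
      have HIH : ∀ c v', dfsF f g c n = some v' → ∃ k ≤ (pvMaxLen g + 2) ^ f,
          ∀ st res m, runM (k + m) g ((c, n, false) :: st) res = runM m g st (res ++ [v']) :=
        fun c v' hc => ihf c n v' hc
      obtain ⟨k1, hk1, H1⟩ := runM_push f g n HIH (cs.filter (fun c => c ≠ p)) vs hfa
      have hlen : (cs.filter (fun c => c ≠ p)).length = vs.length := hfa.length_eq
      have hcslen : cs.length ≤ pvMaxLen g := lookup_maxLen g n cs hl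
      have hfl : (cs.filter (fun c => c ≠ p)).length ≤ cs.length := List.length_filter_le _ _
      refine ⟨k1 + 2, ?_, fun st res m => ?_⟩
      · have hp1 : 1 ≤ (pvMaxLen g + 2) ^ f := Nat.one_le_pow _ _ (by omega)
        have hps : (pvMaxLen g + 2) ^ (f + 1) = (pvMaxLen g + 2) ^ f * (pvMaxLen g + 2) :=
          pow_succ _ _
        have hb : k1 ≤ pvMaxLen g * (pvMaxLen g + 2) ^ f :=
          le_trans hk1 (Nat.mul_le_mul_right _ (le_trans hfl hcslen))
        nlinarith
      · have hstep : k1 + 2 + m = (k1 + (1 + m)) + 1 := by omega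
        rw [hstep, runM]
        simp only [Bool.false_eq_true, if_false, hl]
        rw [H1 ((n, p, true) :: st) res (1 + m)]
        have hstep2 : 1 + m = m + 1 := by omega
        rw [hstep2, runM]
        simp only [if_true, hl]
        have hlen2 : (res ++ vs.reverse).length - (List.filter (fun c => decide (c ≠ p)) cs).length
            = res.length := by
          rw [List.length_append, List.length_reverse]; omega
        rw [hlen2]
        rw [List.drop_left, List.take_left]
        have hvval : (if PySem.Int.mod vs.reverse.sum 2 = 0 then (1 : Int) else vs.reverse.sum + 1) = v := by
          rw [List.sum_reverse]
          rw [hv]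
          simp
        rw [hvval]

-- ===== VERDICT (by name: the statement is the Claim_ definition above) =====
theorem dfs_spec : Claim_equal_dfs := by
  intro g node parent _ hpre
  unfold Spec_dfs
  unfold Pre_dfs pvPreB at hpre
  rw [Bool.and_eq_true, Bool.and_eq_true, Bool.and_eq_true] at hpre
  obtain ⟨⟨⟨hmem, hkeys⟩, hstab⟩, hpeel⟩ := hpre
  rw [decide_eq_true_eq] at hmem
  rw [decide_eq_true_eq] at hpeel
  rw [List.all_eq_true] at hkeys
  rw [List.all_eq_true] at hstab
  have hkeys' : ∀ s ∈ pvClose g node parent, (pvLookup g s.1).isSome := fun s hsm => by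
    simpa using hkeys s hsm
  have hstab' : ∀ s ∈ pvClose g node parent, ∀ t ∈ pvSuccs g s, t ∈ pvClose g node parent := by
    intro s hsm t htm
    have := hstab s hsm
    rw [List.all_eq_true] at this
    simpa using this t htm
  have hnotin : (node, parent) ∉ pvPeelN (pvFuel g) g (pvClose g node parent) := by
    rw [hpeel]; simp
  have hsome := dfsF_isSome g (pvClose g node parent) hkeys' hstab' (pvFuel g)
    (node, parent) hmem hnotin (pvFuel g + 1) (by omega)
  obtain ⟨v, hv⟩ := Option.isSome_iff_exists.mp hsome
  obtain ⟨k, hk, H⟩ := runM_sim g (pvFuel g + 1) node parent v hv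
  have hrun1 : runM (k + 1) g [(node, parent, false)] [] = some v := by
    rw [H [] [] 1, runM]
    simp [PySem.List.pyGet?, PySem.List.pyIdx?]
  have hrun : runM ((pvMaxLen g + 2) ^ (pvFuel g + 1) + 1) g [(node, parent, false)] [] = some v :=
    runM_mono_le g (k + 1) _ _ _ _ hrun1 (by omega)
  unfold dfs dfs_alt
  rw [hv, hrun]
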